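-- pv_equiv track=rewrite | github.com/connniew/ml | py_probs.py | couplenames
-- ===== SOURCE A (Python) =====
-- def couplenames(first, second):
--     first_vowels = [i for i in range(len(first)) if first[i] in "aeiou"]
--     first_end = first_vowels[0]
--     vowel_groups = []
--
--     if len(first_vowels) > 1:
--         sublist = [first_vowels[0]]
--         previous = first_vowels[0]
--
--         for i in range(1, len(first_vowels)):
--             current = first_vowels[i]
--             if current - previous == 1:
--                 sublist.append(current)
--             else:
--                 vowel_groups.append(sublist)
--                 sublist = [current]
--             previous = current
--         if sublist:
--             vowel_groups.append(sublist)
--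
--     if len(vowel_groups) == 1:
--         first_end = vowel_groups[0][0]
--     elif len(vowel_groups) > 1:
--         first_end = vowel_groups[-2][0]
--
--     for i in range(len(second)):
--         if second[i] in "aeiou":
--             second_start = i
--             break
--
--     return first[:first_end] + second[second_start:]
-- ===== SOURCE B (Python) =====
-- def couplenames(first, second):
--     vowels = "aeiou"
--     starts = [i for i, c in enumerate(first)
--               if c in vowels and (i == 0 or first[i - 1] not in vowels)]
--     first_end = starts[-2] if len(starts) > 1 else starts[0]
--     second_start = next(i for i, c in enumerate(second) if c in vowels)
--     return first[:first_end] + second[second_start:]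
-- ===== Notes on version B (the rewrite author's own statement) =====
-- stated objective: simpler
-- what changed: A builds the full list of vowel indices, then runs a second grouping loop that reconstructs every vowel run as a sublist before taking the [-2] (or first) group's head; B does one scan that directly keeps only the vowel-run start positions and indexes into that list, eliminating the grouping pass and the per-run sublists.
import Mathlib
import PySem

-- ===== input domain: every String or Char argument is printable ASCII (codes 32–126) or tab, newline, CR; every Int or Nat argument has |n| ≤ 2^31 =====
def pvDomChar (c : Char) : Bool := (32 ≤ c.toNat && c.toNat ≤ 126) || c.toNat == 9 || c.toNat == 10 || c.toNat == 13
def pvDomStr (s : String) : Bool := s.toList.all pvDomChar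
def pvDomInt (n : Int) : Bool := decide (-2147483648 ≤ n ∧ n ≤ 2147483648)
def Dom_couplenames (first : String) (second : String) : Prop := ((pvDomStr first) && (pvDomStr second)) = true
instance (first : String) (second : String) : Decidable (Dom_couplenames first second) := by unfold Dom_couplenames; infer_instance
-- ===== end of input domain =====

-- B replaces A's explicit run-grouping pass over the vowel-index list by a single filter keeping
-- only vowel-run starts (simpler decomposition; equal return value proved on Pre_).

-- ===== PORT A =====
-- c in "aeiou" (single-character substring test)
def pvVowel (c : Char) : Bool := PySem.Chars.isIn [c] ("aeiou".toList)

-- first_vowels = [i for i in range(len(first)) if first[i] in "aeiou"]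
def pvFirstVowels (cs : List Char) : List Int :=
  (PySem.List.pyRange 0 (cs.length : Int) 1).filter
    (fun i => pvVowel (PySem.List.pyGetD cs i ' '))

-- the body of A's grouping loop, on the state (vowel_groups, sublist, previous)
def pvStepA (st : List (List Int) × List Int × Int) (current : Int) :
    List (List Int) × List Int × Int :=
  if current - st.2.2 = 1 then (st.1, st.2.1 ++ [current], current)
  else (st.1 ++ [st.2.1], [current], current)

-- if sublist: vowel_groups.append(sublist)
def pvFinish (st : List (List Int) × List Int × Int) : List (List Int) :=
  if st.2.1 ≠ [] then st.1 ++ [st.2.1] else st.1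

-- the whole 'if len(first_vowels) > 1: …' grouping block
def pvGroupsA (fv : List Int) : List (List Int) :=
  if fv.length > 1 then
    pvFinish ((PySem.List.pyRange 1 (fv.length : Int) 1).foldl
      (fun st i => pvStepA st (PySem.List.pyGetD fv i 0))
      ([], [PySem.List.pyGetD fv 0 0], PySem.List.pyGetD fv 0 0))
  else []

-- first_end (first_vowels[0] raises IndexError when first has no vowel: outside Pre_)
def pvFirstEndA (cs : List Char) : Int :=
  if (pvGroupsA (pvFirstVowels cs)).length = 1 then
    PySem.List.pyGetD (PySem.List.pyGetD (pvGroupsA (pvFirstVowels cs)) 0 []) 0 0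
  else if (pvGroupsA (pvFirstVowels cs)).length > 1 then
    PySem.List.pyGetD (PySem.List.pyGetD (pvGroupsA (pvFirstVowels cs)) (-2) []) 0 0
  else PySem.List.pyGetD (pvFirstVowels cs) 0 0

-- for i in range(len(second)): if vowel: second_start = i; break
-- (no vowel: second_start unbound, UnboundLocalError in Python: outside Pre_)
def pvSecondStartA (ds : List Char) : Int :=
  match (PySem.List.pyRange 0 (ds.length : Int) 1).find?
      (fun i => pvVowel (PySem.List.pyGetD ds i ' ')) with
  | some i => i
  | none => 0

def couplenames (first : String) (second : String) : String :=
  String.ofList (PySem.List.slice first.toList none (some (pvFirstEndA first.toList)) ++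
                 PySem.List.slice second.toList (some (pvSecondStartA second.toList)) none)

-- ===== PORT B =====
-- [i for i, c in enumerate(first) if c in vowels and (i == 0 or first[i-1] not in vowels)]
def pvStarts (cs : List Char) : List Int :=
  ((PySem.List.enumerate cs).filter (fun p =>
      pvVowel p.2 && (p.1 == 0 || !(pvVowel (PySem.List.pyGetD cs (p.1 - 1) ' '))))).map
    (fun p => p.1)

-- starts[-2] if len(starts) > 1 else starts[0] (IndexError when no vowel: outside Pre_)
def pvFirstEndB (cs : List Char) : Int :=
  if (pvStarts cs).length > 1 then PySem.List.pyGetD (pvStarts cs) (-2) 0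
  else PySem.List.pyGetD (pvStarts cs) 0 0

-- next(i for i, c in enumerate(second) if c in vowels) (StopIteration: outside Pre_)
def pvSecondStartB (ds : List Char) : Int :=
  match (PySem.List.enumerate ds).find? (fun p => pvVowel p.2) with
  | some p => p.1
  | none => 0

def couplenames_alt (first : String) (second : String) : String :=
  String.ofList (PySem.List.slice first.toList none (some (pvFirstEndB first.toList)) ++
                 PySem.List.slice second.toList (some (pvSecondStartB second.toList)) none)

-- ===== PRECONDITION & SPEC =====
-- Pre_ excludes exactly the inputs on which A raises: a first with no vowel (IndexError on
-- first_vowels[0]) and a second with no vowel (UnboundLocalError on second_start).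
def Pre_couplenames (first : String) (second : String) : Prop :=
  first.toList.any pvVowel = true ∧ second.toList.any pvVowel = true
instance (first : String) (second : String) : Decidable (Pre_couplenames first second) := by
  unfold Pre_couplenames; infer_instance
def pvWitness_couplenames : String × String := ("ada", "eve")
def Spec_couplenames (first : String) (second : String) (out : String) : Prop :=
  out = couplenames_alt first second
instance (first : String) (second : String) (out : String) :
    Decidable (Spec_couplenames first second out) := by unfold Spec_couplenames; infer_instance

-- ===== CLAIM (what is proved, stated in full; the proofs are below) =====
def Claim_equal_couplenames : Prop := ∀ (first : String) (second : String),
  Dom_couplenames first second → Pre_couplenames first second →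
  Spec_couplenames first second (couplenames first second)

-- ===== LEMMAS AND PROOFS =====

-- run starts of a strictly increasing index list, relative to a preceding index p
def pvGo (p : Int) : List Int → List Int
  | [] => []
  | c :: t => if c - p = 1 then pvGo c t else c :: pvGo c t

theorem pv_enum_eq (xs : List Char) : ∀ (pre : List Char),
    PySem.List.enumerate xs (pre.length : Int) =
      (PySem.List.pyRange (pre.length : Int) ((pre.length : Int) + (xs.length : Int)) 1).map
        (fun i => (i, PySem.List.pyGetD (pre ++ xs) i ' ')) := by
  induction xs with
  | nil =>
    intro pre
    simp [PySem.List.pyRange_one_eq_nil]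
  | cons c t ih =>
    intro pre
    have hcons : PySem.List.pyRange (pre.length : Int)
        ((pre.length : Int) + (((c :: t).length : Nat) : Int)) 1
        = ((pre.length : Int)) :: PySem.List.pyRange ((pre.length : Int) + 1)
            ((pre.length : Int) + (((c :: t).length : Nat) : Int)) 1 := by
      apply PySem.List.pyRange_one_cons
      simp only [List.length_cons]
      push_cast
      omega
    rw [PySem.List.enumerate_cons, hcons, List.map_cons]
    refine congrArg₂ List.cons ?_ ?_
    · have hg : PySem.List.pyGetD (pre ++ c :: t) ((pre.length : Nat) : Int) ' ' = c := by
        rw [PySem.List.pyGetD_natCast]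
        simp [List.getD]
      rw [hg]
    · have ih' := ih (pre ++ [c])
      have hl : (((pre ++ [c]).length : Nat) : Int) = (pre.length : Int) + 1 := by
        simp
      rw [hl, List.append_assoc] at ih'
      simp only [List.singleton_append] at ih'
      have he : (pre.length : Int) + 1 + ((t.length : Nat) : Int)
          = (pre.length : Int) + (((c :: t).length : Nat) : Int) := by
        simp; omega
      rw [he] at ih'
      exact ih'

theorem pv_enum_zero (xs : List Char) :
    PySem.List.enumerate xs 0 =
      (PySem.List.pyRange 0 (xs.length : Int) 1).map
        (fun i => (i, PySem.List.pyGetD xs i ' ')) := by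
  simpa using pv_enum_eq xs []

theorem pv_fv_mem (cs : List Char) (i : Int) :
    i ∈ pvFirstVowels cs ↔
      0 ≤ i ∧ i < (cs.length : Int) ∧ pvVowel (PySem.List.pyGetD cs i ' ') = true := by
  unfold pvFirstVowels
  rw [List.mem_filter, PySem.List.mem_pyRange_one]
  tauto

theorem pv_fv_sorted (cs : List Char) : (pvFirstVowels cs).Pairwise (· < ·) :=
  List.Pairwise.sublist List.filter_sublist (PySem.List.pairwise_lt_pyRange_one _ _)

theorem pv_q_oob (cs : List Char) (j : Int) (hj : (cs.length : Int) ≤ j) :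
    pvVowel (PySem.List.pyGetD cs j ' ') = false := by
  have hnone : PySem.List.pyGet? cs j = none := by
    rw [PySem.List.pyGet?_eq_none_iff]
    intro hir
    simp [PySem.Raise.InRange] at hir
    omega
  rw [PySem.List.pyGetD_of_none _ _ _ hnone]
  decide

theorem pv_fv_ne (cs : List Char) (h : cs.any pvVowel = true) : pvFirstVowels cs ≠ [] := by
  obtain ⟨x, hx, hvx⟩ := List.any_eq_true.mp h
  obtain ⟨k, hk, hxk⟩ := List.mem_iff_getElem.mp hx
  intro hnil
  have hm : (k : Int) ∈ pvFirstVowels cs := by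
    rw [pv_fv_mem]
    refine ⟨Int.natCast_nonneg k, by exact_mod_cast hk, ?_⟩
    rw [PySem.List.pyGetD_natCast, List.getD_eq_getElem _ _ hk, hxk]
    exact hvx
  rw [hnil] at hm
  simp at hm

theorem pv_starts_eq (cs : List Char) :
    pvStarts cs = (pvFirstVowels cs).filter
      (fun i => i == 0 || !(pvVowel (PySem.List.pyGetD cs (i - 1) ' '))) := by
  unfold pvStarts pvFirstVowels
  rw [pv_enum_zero, List.filter_map, List.map_map]
  rw [show ((fun (p : Int × Char) => p.1) ∘
      (fun i : Int => (i, PySem.List.pyGetD cs i ' '))) = id from rfl]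
  rw [List.map_id]
  rw [show ((fun (p : Int × Char) =>
        pvVowel p.2 && (p.1 == 0 || !(pvVowel (PySem.List.pyGetD cs (p.1 - 1) ' ')))) ∘
      (fun i : Int => (i, PySem.List.pyGetD cs i ' ')))
      = (fun i : Int => pvVowel (PySem.List.pyGetD cs i ' ') &&
        (i == 0 || !(pvVowel (PySem.List.pyGetD cs (i - 1) ' ')))) from rfl]
  rw [show (fun i : Int => pvVowel (PySem.List.pyGetD cs i ' ') &&
        (i == 0 || !(pvVowel (PySem.List.pyGetD cs (i - 1) ' '))))
      = (fun i : Int => (i == 0 || !(pvVowel (PySem.List.pyGetD cs (i - 1) ' '))) &&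
        pvVowel (PySem.List.pyGetD cs i ' ')) from funext (fun i => Bool.and_comm _ _)]
  rw [List.filter_filter]

theorem pv_go_filter (q : Int → Bool) : ∀ (t : List Int) (p : Int), 0 ≤ p → q p = true →
    ((p :: t).Pairwise (· < ·)) → (∀ j : Int, p < j → (q j = true ↔ j ∈ t)) →
    pvGo p t = t.filter (fun i => i == 0 || !q (i - 1)) := by
  intro t
  induction t with
  | nil =>
    intro p _ _ _ _
    simp [pvGo]
  | cons c t' ih =>
    intro p hp0 hqp hsort hcompl
    have hpc : p < c := (List.pairwise_cons.mp hsort).1 c (by simp)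
    have hsort' : (c :: t').Pairwise (· < ·) := (List.pairwise_cons.mp hsort).2
    have ht' : ∀ x ∈ t', c < x := (List.pairwise_cons.mp hsort').1
    have hqc : q c = true := (hcompl c hpc).mpr (by simp)
    have hcne : c ≠ 0 := by omega
    have hc0 : (c == 0) = false := by simp [hcne]
    have hcompl' : ∀ j : Int, c < j → (q j = true ↔ j ∈ t') := by
      intro j hj
      rw [hcompl j (by omega)]
      constructor
      · intro hm
        rcases List.mem_cons.mp hm with h | h
        · omega
        · exact h
      · exact fun h => List.mem_cons_of_mem _ h
    by_cases hcp : c - p = 1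
    · have hq1 : q (c - 1) = true := by
        have hce : c - 1 = p := by omega
        rw [hce]; exact hqp
      rw [show pvGo p (c :: t') = pvGo c t' from by simp [pvGo, hcp]]
      rw [List.filter_cons]
      simp only [hc0, hq1, Bool.not_true, Bool.or_false]
      exact ih c (by omega) hqc hsort' hcompl'
    · have hq1 : q (c - 1) = false := by
        cases hqq : q (c - 1) with
        | false => rfl
        | true =>
          exfalso
          have hmem := (hcompl (c - 1) (by omega)).mp hqq
          rcases List.mem_cons.mp hmem with hh | hh
          · omega
          · have := ht' _ hh
            omega
      rw [show pvGo p (c :: t') = c :: pvGo c t' from by simp [pvGo, hcp]]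
      rw [List.filter_cons]
      simp only [hc0, hq1, Bool.not_false, Bool.or_true, if_true]
      rw [ih c (by omega) hqc hsort' hcompl']
    
theorem pv_starts_cons (cs : List Char) (v : Int) (t : List Int)
    (hL : pvFirstVowels cs = v :: t) : pvStarts cs = v :: pvGo v t := by
  have hsort : (v :: t).Pairwise (· < ·) := hL ▸ pv_fv_sorted cs
  have hvmem : v ∈ pvFirstVowels cs := by rw [hL]; simp
  obtain ⟨hv0, hvn, hvq⟩ := (pv_fv_mem cs v).mp hvmem
  have hcompl : ∀ j : Int, v < j → (pvVowel (PySem.List.pyGetD cs j ' ') = true ↔ j ∈ t) := by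
    intro j hj
    constructor
    · intro hqj
      by_cases hjn : j < (cs.length : Int)
      · have hm : j ∈ pvFirstVowels cs := (pv_fv_mem _ _).mpr ⟨by omega, hjn, hqj⟩
        rw [hL] at hm
        rcases List.mem_cons.mp hm with h | h
        · omega
        · exact h
      · exfalso
        rw [pv_q_oob cs j (by omega)] at hqj
        exact Bool.false_ne_true hqj
    · intro hjt
      have hm : j ∈ pvFirstVowels cs := by
        rw [hL]; exact List.mem_cons_of_mem _ hjt
      exact ((pv_fv_mem _ _).mp hm).2.2
  have hcond : (v == 0 || !(pvVowel (PySem.List.pyGetD cs (v - 1) ' '))) = true := by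
    by_cases hv : v = 0
    · simp [hv]
    · have h1 : pvVowel (PySem.List.pyGetD cs (v - 1) ' ') = false := by
        cases hq : pvVowel (PySem.List.pyGetD cs (v - 1) ' ') with
        | false => rfl
        | true =>
          exfalso
          have hm : v - 1 ∈ pvFirstVowels cs := (pv_fv_mem _ _).mpr ⟨by omega, by omega, hq⟩
          rw [hL] at hm
          rcases List.mem_cons.mp hm with h | h
          · omega
          · have := (List.pairwise_cons.mp hsort).1 _ h
            omega
      simp [h1]
  rw [pv_starts_eq, hL, List.filter_cons]
  rw [hcond, if_pos rfl]
  congr 1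
  exact (pv_go_filter (fun i => pvVowel (PySem.List.pyGetD cs i ' ')) t v hv0 hvq hsort hcompl).symm

theorem pv_fold_heads : ∀ (rest : List Int) (g : List (List Int)) (sl : List Int) (p : Int),
    sl ≠ [] →
    (rest.foldl pvStepA (g, sl, p)).2.1 ≠ [] ∧
    ((rest.foldl pvStepA (g, sl, p)).1 ++ [(rest.foldl pvStepA (g, sl, p)).2.1]).map
        (fun l => PySem.List.pyGetD l 0 0)
      = g.map (fun l => PySem.List.pyGetD l 0 0) ++
          (PySem.List.pyGetD sl 0 0 :: pvGo p rest) := by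
  intro rest
  induction rest with
  | nil =>
    intro g sl p h
    exact ⟨h, by simp [pvGo]⟩
  | cons c rest ih =>
    intro g sl p h
    rw [List.foldl_cons]
    by_cases hc : c - p = 1
    · rw [show pvStepA (g, sl, p) c = (g, sl ++ [c], c) from by simp [pvStepA, hc]]
      obtain ⟨h1, h2⟩ := ih g (sl ++ [c]) c (by simp)
      refine ⟨h1, ?_⟩
      rw [h2]
      have hsl : PySem.List.pyGetD (sl ++ [c]) 0 0 = PySem.List.pyGetD sl 0 0 := by
        cases sl with
        | nil => exact absurd rfl h
        | cons a sl' => simp [List.cons_append, PySem.List.pyGetD_zero_cons]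
      rw [hsl, show pvGo p (c :: rest) = pvGo c rest from by simp [pvGo, hc]]
    · rw [show pvStepA (g, sl, p) c = (g ++ [sl], [c], c) from by simp [pvStepA, hc]]
      obtain ⟨h1, h2⟩ := ih (g ++ [sl]) [c] c (by simp)
      refine ⟨h1, ?_⟩
      rw [h2, show pvGo p (c :: rest) = c :: pvGo c rest from by simp [pvGo, hc]]
      simp [List.map_append, PySem.List.pyGetD_zero_cons]

theorem pv_groupsA_eq (v c : Int) (t2 : List Int) :
    pvGroupsA (v :: c :: t2) ≠ [] ∧
    (pvGroupsA (v :: c :: t2)).map (fun l => PySem.List.pyGetD l 0 0)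
      = v :: pvGo v (c :: t2) := by
  unfold pvGroupsA
  rw [if_pos (by simp)]
  rw [PySem.List.pyGetD_zero_cons]
  rw [PySem.List.foldl_pyRange_pyGetD' (v :: c :: t2) 0 pvStepA ([], [v], v) (by norm_num)]
  rw [show ((1 : Int).toNat) = 1 from rfl]
  rw [List.drop_one]
  simp only [List.tail_cons]
  obtain ⟨hne, hmap⟩ := pv_fold_heads (c :: t2) [] [v] v (by simp)
  unfold pvFinish
  rw [if_pos hne]
  refine ⟨by simp, ?_⟩
  simpa using hmap

theorem pv_hd_zero (res : List (List Int)) (hne : res ≠ []) :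
    PySem.List.pyGetD (res.map (fun l => PySem.List.pyGetD l 0 0)) 0 0
      = PySem.List.pyGetD (PySem.List.pyGetD res 0 []) 0 0 := by
  cases res with
  | nil => exact absurd rfl hne
  | cons r rs => simp [PySem.List.pyGetD_zero_cons]

theorem pv_hd_neg2 (res : List (List Int)) (h : 2 ≤ res.length) :
    PySem.List.pyGetD (res.map (fun l => PySem.List.pyGetD l 0 0)) (-2) 0
      = PySem.List.pyGetD (PySem.List.pyGetD res (-2) []) 0 0 := by
  rw [PySem.List.pyGetD_neg_ofNat _ 2 _ (by norm_num) (by simpa using h),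
      PySem.List.pyGetD_neg_ofNat _ 2 _ (by norm_num) h]
  simp [List.getElem_map]

theorem pv_e1 (cs : List Char) (h : cs.any pvVowel = true) :
    pvFirstEndA cs = pvFirstEndB cs := by
  rcases hL : pvFirstVowels cs with _ | ⟨v, t⟩
  · exact absurd hL (pv_fv_ne cs h)
  · have hS := pv_starts_cons cs v t hL
    unfold pvFirstEndA pvFirstEndB
    rw [hL, hS]
    rcases t with _ | ⟨c, t2⟩
    · simp [pvGroupsA, pvGo]
    · obtain ⟨hgne, hgmap⟩ := pv_groupsA_eq v c t2
      by_cases h1 : (pvGroupsA (v :: c :: t2)).length = 1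
      · rw [if_pos h1, ← hgmap, if_neg (by simp [h1])]
        exact (pv_hd_zero _ hgne).symm
      · have hp1 : (pvGroupsA (v :: c :: t2)).length > 1 := by
          have := List.length_pos_of_ne_nil hgne
          omega
        rw [if_neg h1, if_pos hp1, ← hgmap, if_pos (by simp; omega)]
        exact (pv_hd_neg2 _ (by omega)).symm

theorem pv_e2 (ds : List Char) : pvSecondStartA ds = pvSecondStartB ds := by
  unfold pvSecondStartA pvSecondStartB
  rw [pv_enum_zero, List.find?_map]
  rw [show ((fun (p : Int × Char) => pvVowel p.2) ∘
      (fun i : Int => (i, PySem.List.pyGetD ds i ' ')))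
      = (fun i : Int => pvVowel (PySem.List.pyGetD ds i ' ')) from rfl]
  cases hf : (PySem.List.pyRange 0 (ds.length : Int) 1).find?
      (fun i => pvVowel (PySem.List.pyGetD ds i ' ')) with
  | none => rfl
  | some i => rfl

-- ===== VERDICT (by name: the statement is the Claim_ definition above) =====
theorem couplenames_spec : Claim_equal_couplenames := by
  intro first second _ hpre
  obtain ⟨h1, h2⟩ := hpre
  unfold Spec_couplenames couplenames couplenames_alt
  rw [pv_e1 _ h1, pv_e2]
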